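-- pv_equiv track=rewrite | github.com/ajcmde/modbus | python/modbus.py | __res_string
-- ===== SOURCE A (Python) =====
-- def __res_string(Message):
--     if Message is None or len(Message) == 0:
--         return None
--     Result = ""
--     for i in range(0, len(Message)):
--         if Message[i] == 0:
--             break
--         Result += chr(Message[i])
--     return Result
-- ===== SOURCE B (Python) =====
-- def __res_string(Message):
--     if Message is None or len(Message) == 0:
--         return None
--     try:
--         idx = Message.index(0)
--     except ValueError:
--         idx = len(Message)
--     return ''.join(chr(c) for c in Message[:idx])
-- ===== Notes on version B (the rewrite author's own statement) =====
-- stated objective: idiomatic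
-- what changed: Replaces the scan-with-break that appends characters one by one with a two-phase locate-then-build: find the first zero with a guarded list.index(0) (defaulting to the length), then build the whole result at once with ''.join over the slice before the terminator.
-- outside the precondition, e.g. on __res_string([-1]): A raises ValueError, B raises ValueError
import Mathlib
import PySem

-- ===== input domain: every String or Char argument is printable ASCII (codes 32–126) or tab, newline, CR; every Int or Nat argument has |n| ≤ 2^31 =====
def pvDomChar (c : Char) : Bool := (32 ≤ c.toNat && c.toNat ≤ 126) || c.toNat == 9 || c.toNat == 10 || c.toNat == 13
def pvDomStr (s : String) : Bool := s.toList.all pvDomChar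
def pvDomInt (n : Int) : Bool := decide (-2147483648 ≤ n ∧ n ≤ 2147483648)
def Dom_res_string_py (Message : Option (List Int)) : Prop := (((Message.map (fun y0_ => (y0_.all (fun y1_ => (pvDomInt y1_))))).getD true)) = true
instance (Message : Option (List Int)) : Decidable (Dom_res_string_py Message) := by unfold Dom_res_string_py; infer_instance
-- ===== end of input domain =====

-- B replaces A's scan-with-break and character-by-character accumulation by a locate-the-terminator
-- phase (guarded .index(0)) followed by a single join over the slice; return-value equivalence only.

-- chr(c) for a valid Unicode scalar value c (Pre_ guarantees validity)
def pyChr (c : Int) : Char := Char.ofNat c.toNat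

-- ===== PORT A =====
-- the for-loop with break: walks the list, stops at the first 0, appends chr of each element
def resStringLoop (xs : List Int) (acc : List Char) : List Char :=
  match xs with
  | [] => acc
  | c :: rest => if c = 0 then acc else resStringLoop rest (acc ++ [pyChr c])

def res_string_py (Message : Option (List Int)) : Option String :=
  match Message with
  | none => none
  | some xs => if xs.length = 0 then none else some (String.ofList (resStringLoop xs []))

-- ===== PORT B =====
def res_string_py_alt (Message : Option (List Int)) : Option String :=
  match Message with
  | none => none
  | some xs =>
    if xs.length = 0 then none
    else
      -- idx = Message.index(0) with ValueError defaulting to len(Message)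
      let idx := (PySem.List.index? xs 0).getD xs.length
      -- ''.join(chr(c) for c in Message[:idx]); idx is a nonnegative in-range bound, so the slice is take
      some (String.ofList ((xs.take idx).map pyChr))

-- ===== PRECONDITION & SPEC =====
-- Pre_ excludes lists whose prefix before the first zero contains a value on which Python's chr
-- raises ValueError (negative or above 0x10FFFF) or a surrogate code point 0xD800..0xDFFF, whose
-- lone-surrogate result string is not representable as a Lean String (both programs behave alike there).
def Pre_res_string_py (Message : Option (List Int)) : Prop :=
  ∀ c ∈ (Message.getD []).takeWhile (· ≠ 0), 0 ≤ c ∧ (c < 0xD800 ∨ (0xE000 ≤ c ∧ c < 0x110000))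
instance (Message : Option (List Int)) : Decidable (Pre_res_string_py Message) := by unfold Pre_res_string_py; infer_instance

def pvWitness_res_string_py : Option (List Int) := some [72, 105, 0, 65]

def Spec_res_string_py (Message : Option (List Int)) (out : Option String) : Prop := out = res_string_py_alt Message
instance (Message : Option (List Int)) (out : Option String) : Decidable (Spec_res_string_py Message out) := by unfold Spec_res_string_py; infer_instance

-- ===== CLAIM (what is proved, stated in full; the proofs are below) =====
def Claim_equal_res_string_py : Prop := ∀ (Message : Option (List Int)), Dom_res_string_py Message → Pre_res_string_py Message → Spec_res_string_py Message (res_string_py Message)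

-- ===== LEMMAS AND PROOFS =====

-- A's loop produces chr of the prefix before the first zero
theorem resStringLoop_eq (xs : List Int) (acc : List Char) :
    resStringLoop xs acc = acc ++ (xs.takeWhile (· ≠ 0)).map pyChr := by
  induction xs generalizing acc with
  | nil => simp [resStringLoop]
  | cons c rest ih =>
    by_cases hc : c = 0
    · simp [resStringLoop, hc, List.takeWhile]
    · simp [resStringLoop, hc, ih, List.takeWhile]

-- B's boundary: taking up to the first index of 0 is taking while nonzero
theorem take_index_eq_takeWhile (xs : List Int) :
    xs.take ((PySem.List.index? xs 0).getD xs.length) = xs.takeWhile (· ≠ 0) := by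
  induction xs with
  | nil => simp
  | cons c rest ih =>
    by_cases hc : c = 0
    · subst hc
      rw [PySem.List.index?_cons_self]
      simp [List.takeWhile]
    · rw [PySem.List.index?_cons_of_ne rest hc]
      cases h : PySem.List.index? rest 0 with
      | none =>
        rw [h] at ih
        simp only [Option.map_none, Option.getD_none] at ih ⊢
        simp [List.takeWhile, hc, List.take_succ_cons, ih]
      | some k =>
        rw [h] at ih
        simp only [Option.map_some, Option.getD_some] at ih ⊢
        simp [List.takeWhile, hc, List.take_succ_cons, ih]

-- ===== VERDICT (by name: the statement is the Claim_ definition above) =====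
theorem res_string_py_spec : Claim_equal_res_string_py := by
  intro Message _ _
  unfold Spec_res_string_py res_string_py res_string_py_alt
  cases Message with
  | none => rfl
  | some xs =>
    by_cases h : xs.length = 0
    · simp [h]
    · simp only [h, reduceIte]
      rw [resStringLoop_eq, take_index_eq_takeWhile]
      simp
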